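-- pv_equiv track=rewrite | github.com/najibninaba/CascadedFCN | src/showing_images.py | get_pixel_levels
-- ===== SOURCE A (Python) =====
-- def get_pixel_levels(image):
--     '''
--     Function that gets all the different pixel levels for a given image
--
--     Inputs:
--     image: An image
--
--     Outputs:
--     returns a sorted list of different pixel values
--     '''
--     temp = []
--     for i in image:
--         for j in i:
--             if j not in temp:
--                 temp.append(j)
--     temp.sort()
--     return temp
-- ===== SOURCE B (Python) =====
-- def get_pixel_levels(image):
--     flat = []
--     for row in image:
--         flat += row
--     flat.sort()
--     out = []
--     for v in flat:
--         if not out or out[-1] != v: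
--             out.append(v)
--     return out
-- ===== Notes on version B (the rewrite author's own statement) =====
-- stated objective: faster
-- what changed: Replaces A's per-element linear membership scan over the growing distinct list with flatten, sort once, then a single adjacent-duplicate scan.
import Mathlib
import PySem

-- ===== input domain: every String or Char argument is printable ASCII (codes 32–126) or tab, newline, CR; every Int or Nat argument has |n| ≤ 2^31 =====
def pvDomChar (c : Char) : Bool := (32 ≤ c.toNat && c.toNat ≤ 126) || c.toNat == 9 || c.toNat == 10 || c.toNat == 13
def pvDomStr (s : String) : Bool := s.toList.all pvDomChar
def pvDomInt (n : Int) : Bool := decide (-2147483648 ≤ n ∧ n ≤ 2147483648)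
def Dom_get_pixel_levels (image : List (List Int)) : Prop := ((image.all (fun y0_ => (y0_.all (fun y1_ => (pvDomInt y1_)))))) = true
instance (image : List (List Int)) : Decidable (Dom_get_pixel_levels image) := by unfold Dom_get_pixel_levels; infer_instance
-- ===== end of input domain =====

-- B replaces A's per-element membership scan over the growing distinct list by flatten + sort once + one adjacent-duplicate scan.

-- ===== PORT A =====
-- inner loop: for j in i: if j not in temp: temp.append(j)
def pvInnerA (temp : List Int) (i : List Int) : List Int :=
  i.foldl (fun temp j => if j ∈ temp then temp else temp ++ [j]) temp

def get_pixel_levels (image : List (List Int)) : List Int :=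
  let temp := image.foldl (fun temp i => pvInnerA temp i) []
  PySem.List.sorted temp (fun x => x) false

-- ===== PORT B =====
-- 'if not out or out[-1] != v' is exactly 'out[-1:] does not end in v', i.e. pyGet? out (-1) ≠ some v
def get_pixel_levels_alt (image : List (List Int)) : List Int :=
  let flat := image.foldl (fun flat row => flat ++ row) []
  let s := PySem.List.sorted flat (fun x => x) false
  s.foldl (fun out v => if PySem.List.pyGet? out (-1) ≠ some v then out ++ [v] else out) []

-- ===== PRECONDITION & SPEC =====
def Spec_get_pixel_levels (image : List (List Int)) (out : List Int) : Prop := out = get_pixel_levels_alt image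
instance (image : List (List Int)) (out : List Int) : Decidable (Spec_get_pixel_levels image out) := by unfold Spec_get_pixel_levels; infer_instance

-- ===== CLAIM (what is proved, stated in full; the proofs are below) =====
def Claim_equal_get_pixel_levels : Prop := ∀ (image : List (List Int)), Dom_get_pixel_levels image → Spec_get_pixel_levels image (get_pixel_levels image)

-- ===== LEMMAS AND PROOFS =====

-- A-side dedup: membership and Nodup invariants
theorem mem_pvInnerA (i : List Int) (temp : List Int) (x : Int) :
    x ∈ pvInnerA temp i ↔ x ∈ temp ∨ x ∈ i := by
  induction i generalizing temp with
  | nil => simp [pvInnerA]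
  | cons j t ih =>
    simp only [pvInnerA, List.foldl_cons]
    by_cases hj : j ∈ temp
    · simp only [pvInnerA] at ih
      rw [if_pos hj, ih]
      constructor
      · rintro (h | h) <;> simp_all
      · rintro (h | h)
        · exact Or.inl h
        · rcases List.mem_cons.mp h with h | h
          · exact Or.inl (h ▸ hj)
          · exact Or.inr h
    · simp only [pvInnerA] at ih
      rw [if_neg hj, ih]
      simp only [List.mem_append, List.mem_cons]
      tauto

theorem nodup_pvInnerA (i : List Int) (temp : List Int) (h : temp.Nodup) :
    (pvInnerA temp i).Nodup := by
  induction i generalizing temp with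
  | nil => simpa [pvInnerA]
  | cons j t ih =>
    simp only [pvInnerA, List.foldl_cons]
    by_cases hj : j ∈ temp
    · rw [if_pos hj]; exact ih temp h
    · rw [if_neg hj]
      refine ih _ ?_
      rw [List.nodup_append]
      refine ⟨h, List.nodup_singleton _, ?_⟩
      intro a ha b hb
      rw [List.mem_singleton] at hb
      exact fun e => hj ((e.trans hb) ▸ ha)

def pvDedupA (image : List (List Int)) : List Int :=
  image.foldl (fun temp i => pvInnerA temp i) []

theorem mem_pvDedupA_aux (image : List (List Int)) (temp : List Int) (x : Int) :
    x ∈ image.foldl (fun temp i => pvInnerA temp i) temp ↔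
      x ∈ temp ∨ ∃ r ∈ image, x ∈ r := by
  induction image generalizing temp with
  | nil => simp
  | cons i t ih =>
    simp only [List.foldl_cons]
    rw [ih, mem_pvInnerA]
    simp only [List.mem_cons]
    constructor
    · rintro (h | h)
      · tauto
      · rcases h with ⟨r, hr, hx⟩; exact Or.inr ⟨r, Or.inr hr, hx⟩
    · rintro (h | ⟨r, hr | hr, hx⟩)
      · tauto
      · exact Or.inl (Or.inr (hr ▸ hx))
      · exact Or.inr ⟨r, hr, hx⟩

theorem nodup_pvDedupA (image : List (List Int)) : (pvDedupA image).Nodup := by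
  have aux : ∀ (l : List (List Int)) (temp : List Int), temp.Nodup →
      (l.foldl (fun temp i => pvInnerA temp i) temp).Nodup := by
    intro l
    induction l with
    | nil => intro temp h; simpa
    | cons i t ih => intro temp h; exact ih _ (nodup_pvInnerA i temp h)
  exact aux image [] List.nodup_nil

-- flatten of the B-side foldl
theorem flat_foldl (image : List (List Int)) (acc : List Int) :
    image.foldl (fun flat row => flat ++ row) acc = acc ++ image.flatten := by
  induction image generalizing acc with
  | nil => simp
  | cons r t ih => simp [ih, List.append_assoc]

-- out[-1] in Python is the last element
theorem pyGetNegOne (out : List Int) : PySem.List.pyGet? out (-1) = out.getLast? := by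
  cases out with
  | nil => simp [PySem.List.pyGet?, PySem.List.pyIdx?]
  | cons a t =>
    simp [PySem.List.pyGet?, PySem.List.pyIdx?, List.getLast?_eq_getElem?]

-- B-side adjacent-dedup scan: membership
theorem mem_dedupScan (s : List Int) (out : List Int) (x : Int) :
    x ∈ s.foldl (fun out v => if PySem.List.pyGet? out (-1) ≠ some v then out ++ [v] else out) out ↔
      x ∈ out ∨ x ∈ s := by
  induction s generalizing out with
  | nil => simp
  | cons v t ih =>
    simp only [List.foldl_cons]
    split_ifs with h
    · rw [ih]
      simp only [List.mem_append, List.mem_cons]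
      tauto
    · rw [ih]
      rw [pyGetNegOne] at h
      rw [not_not] at h
      have hv : v ∈ out := List.mem_of_getLast? h
      simp only [List.mem_cons]
      constructor
      · rintro (h' | h') <;> tauto
      · rintro (h' | h' | h')
        · exact Or.inl h'
        · exact Or.inl (h' ▸ hv)
        · exact Or.inr h'

-- B-side scan: strict sortedness, given the tail is ≤-sorted and links above out
theorem pairwise_dedupScan (s : List Int) (out : List Int)
    (hs : s.Pairwise (· ≤ ·)) (hout : out.Pairwise (· < ·))
    (hlink : ∀ x ∈ out, ∀ y ∈ s, x ≤ y) :
    (s.foldl (fun out v => if PySem.List.pyGet? out (-1) ≠ some v then out ++ [v] else out) out).Pairwise (· < ·) := by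
  induction s generalizing out with
  | nil => simpa
  | cons v t ih =>
    have hs' : t.Pairwise (· ≤ ·) := hs.tail
    have hvt : ∀ y ∈ t, v ≤ y := fun y hy => List.rel_of_pairwise_cons hs hy
    simp only [List.foldl_cons]
    split_ifs with h
    · -- append v: every x ∈ out satisfies x < v
      have hlast : out.getLast? ≠ some v := by rw [← pyGetNegOne]; exact h
      have hlt : ∀ x ∈ out, x < v := by
        intro x hx
        cases hL : out.getLast? with
        | none =>
          rw [List.getLast?_eq_none_iff] at hL
          rw [hL] at hx; exact absurd hx (List.not_mem_nil)
        | some L =>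
          have hLmem : L ∈ out := List.mem_of_getLast? hL
          have hLv : L ≤ v := hlink L hLmem v (List.mem_cons_self)
          have hLv' : L < v := lt_of_le_of_ne hLv (fun e => hlast (by rw [hL, e]))
          rcases List.getLast?_eq_some_iff.mp hL with ⟨ys, hys⟩
          subst hys
          rcases List.mem_append.mp hx with hx' | hx'
          · have hxL : x < L :=
              (List.pairwise_append.mp hout).2.2 x hx' L (List.mem_singleton.mpr rfl)
            exact hxL.trans hLv'
          · rw [List.mem_singleton.mp hx']; exact hLv'
      refine ih (out ++ [v]) hs' ?_ ?_
      · rw [List.pairwise_append]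
        exact ⟨hout, List.pairwise_singleton _ _, fun x hx y hy => (List.mem_singleton.mp hy) ▸ hlt x hx⟩
      · intro x hx y hy
        rcases List.mem_append.mp hx with hx' | hx'
        · exact hlink x hx' y (List.mem_cons_of_mem _ hy)
        · rw [List.mem_singleton.mp hx']; exact hvt y hy
    · exact ih out hs' hout (fun x hx y hy => hlink x hx y (List.mem_cons_of_mem _ hy))

-- ===== VERDICT (by name: the statement is the Claim_ definition above) =====
theorem get_pixel_levels_spec : Claim_equal_get_pixel_levels := by
  intro image _
  unfold Spec_get_pixel_levels get_pixel_levels get_pixel_levels_alt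
  simp only []
  set flat := image.foldl (fun flat row => flat ++ row) [] with hflat
  set s := PySem.List.sorted flat (fun x => x) false with hsdef
  set R := s.foldl (fun out v => if PySem.List.pyGet? out (-1) ≠ some v then out ++ [v] else out) [] with hR
  -- R is strictly increasing
  have hsle : s.Pairwise (· ≤ ·) := by
    have := PySem.List.sorted_pairwise (xs := flat) (key := fun x => x)
    simpa using this
  have hRlt : R.Pairwise (· < ·) :=
    pairwise_dedupScan s [] hsle (List.Pairwise.nil) (by simp)
  have hRnodup : R.Nodup := hRlt.imp (fun h => ne_of_lt h)
  -- membership of R = membership of flatten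
  have hmemR : ∀ x, x ∈ R ↔ ∃ r ∈ image, x ∈ r := by
    intro x
    rw [hR, mem_dedupScan]
    simp only [List.not_mem_nil, false_or]
    rw [hsdef, PySem.List.mem_sorted, hflat, flat_foldl]
    simp [List.mem_flatten]
  -- membership of A's dedup = same
  have hmemA : ∀ x, x ∈ pvDedupA image ↔ ∃ r ∈ image, x ∈ r := by
    intro x
    rw [pvDedupA, mem_pvDedupA_aux]
    simp
  have hperm : R.Perm (pvDedupA image) := by
    rw [List.perm_ext_iff_of_nodup hRnodup (nodup_pvDedupA image)]
    intro a; rw [hmemR a, hmemA a]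
  exact PySem.List.sorted_eq_of_perm_of_pairwise_lt _ R (fun x => x) hperm hRlt
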